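-- pv_equiv track=rewrite | github.com/noorulameenkm/DataStructuresAlgorithms | LeetCode/contests/evenOddTree.py | strictlyDecreasing
-- ===== SOURCE A (Python) =====
-- def strictlyDecreasing(arr):
--     if len(arr) <= 1:
--         return arr[0] % 2 == 0
--
--     if arr[0] % 2 != 0:
--         return False
--
--     for i in range(1, len(arr)):
--         if arr[i] % 2 != 0 or arr[i] >= arr[i - 1]:
--             return False
--
--     return True
-- ===== SOURCE B (Python) =====
-- def strictlyDecreasing(arr):
--     return arr == sorted(set(arr), reverse=True) and all(x % 2 == 0 for x in arr)
-- ===== Notes on version B (the rewrite author's own statement) =====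
-- stated objective: alternative
-- what changed: Instead of A's fused index loop comparing adjacent elements with early returns, B characterises strict decrease by a sort: arr is strictly decreasing iff it equals the reverse-sorted list of its distinct elements (sorted(set(arr), reverse=True)), combined with a parity scan; Pre_ excludes only the empty list, on which A raises IndexError.
import Mathlib
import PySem

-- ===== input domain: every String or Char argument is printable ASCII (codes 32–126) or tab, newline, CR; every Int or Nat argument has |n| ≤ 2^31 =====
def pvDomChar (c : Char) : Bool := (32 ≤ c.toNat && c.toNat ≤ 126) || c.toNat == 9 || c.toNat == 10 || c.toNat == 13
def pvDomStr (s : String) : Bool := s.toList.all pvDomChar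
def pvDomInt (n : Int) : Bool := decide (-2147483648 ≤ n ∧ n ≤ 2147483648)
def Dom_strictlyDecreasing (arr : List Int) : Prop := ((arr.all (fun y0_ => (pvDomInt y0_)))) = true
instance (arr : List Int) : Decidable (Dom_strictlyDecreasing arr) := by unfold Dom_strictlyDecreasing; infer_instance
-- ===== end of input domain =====

-- B replaces A's fused adjacent-comparison loop by a sort-based characterisation:
-- arr is strictly decreasing iff arr == sorted(set(arr), reverse=True); plus a parity scan.


-- ===== PORT A =====
-- Port of A: head parity check then one fused loop over range(1, len(arr)) with early returns.
-- A raises IndexError on [], excluded by Pre_; the [] branch value here is arbitrary.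
def strictlyDecreasingLoopA (arr : List Int) : List Int → Bool
  | [] => true
  | i :: rest =>
    match PySem.List.pyGet? arr i, PySem.List.pyGet? arr (i - 1) with
    | some ai, some ap =>
      if PySem.Int.mod ai 2 ≠ 0 ∨ ai ≥ ap then false
      else strictlyDecreasingLoopA arr rest
    | _, _ => false   -- unreachable: every index from range(1, len(arr)) is in bounds

def strictlyDecreasing (arr : List Int) : Bool :=
  match arr with
  | [] => false
  | x :: _ =>
    if arr.length ≤ 1 then
      decide (PySem.Int.mod x 2 = 0)
    else if PySem.Int.mod x 2 ≠ 0 then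
      false
    else
      strictlyDecreasingLoopA arr (PySem.List.pyRange 1 arr.length 1)

-- ===== PORT B =====
-- Port of B: arr == sorted(set(arr), reverse=True) and all(x % 2 == 0 for x in arr)
def strictlyDecreasing_alt (arr : List Int) : Bool :=
  (arr == PySem.List.sorted (PySem.Set.ofList arr) (fun x => x) true) &&
    arr.all (fun x => PySem.Int.mod x 2 == 0)

-- ===== PRECONDITION & SPEC =====
-- Pre_ excludes only the empty list, on which A raises IndexError (arr[0]).
def Pre_strictlyDecreasing (arr : List Int) : Prop := arr ≠ []
instance (arr : List Int) : Decidable (Pre_strictlyDecreasing arr) := by unfold Pre_strictlyDecreasing; infer_instance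
def pvWitness_strictlyDecreasing : List Int := ([4, 2])

def Spec_strictlyDecreasing (arr : List Int) (out : Bool) : Prop := out = strictlyDecreasing_alt arr
instance (arr : List Int) (out : Bool) : Decidable (Spec_strictlyDecreasing arr out) := by unfold Spec_strictlyDecreasing; infer_instance

-- ===== CLAIM (what is proved, stated in full; the proofs are below) =====
def Claim_equal_strictlyDecreasing : Prop := ∀ (arr : List Int), Dom_strictlyDecreasing arr → Pre_strictlyDecreasing arr → Spec_strictlyDecreasing arr (strictlyDecreasing arr)

-- ===== LEMMAS AND PROOFS =====

-- A's loop over range(i, len) computes the parity scan of the suffix and the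
-- adjacent strict-decrease scan over the suffix pairs.
theorem loopA_eq (arr : List Int) (i : Nat) (hi : 1 ≤ i) :
    strictlyDecreasingLoopA arr (PySem.List.pyRange (i : Int) (arr.length : Int) 1) =
      ((arr.drop i).all (fun x => PySem.Int.mod x 2 == 0) &&
        ((arr.drop (i - 1)).zip (arr.drop i)).all (fun p => p.2 < p.1)) := by
  have hmod : ∀ a : Int, PySem.Int.mod a 2 = a % 2 :=
    fun a => PySem.Int.mod_eq_emod_of_pos (by norm_num)
  by_cases h : i < arr.length
  · have hcons : PySem.List.pyRange (i : Int) (arr.length : Int) 1 =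
        (i : Int) :: PySem.List.pyRange ((i : Int) + 1) (arr.length : Int) 1 :=
      PySem.List.pyRange_one_cons (by exact_mod_cast h)
    have hcast : ((i : Int) + 1) = ((i + 1 : Nat) : Int) := by push_cast; ring
    have hg1 : PySem.List.pyGet? arr (i : Int) = some arr[i] :=
      PySem.List.pyGet?_ofNat arr i h
    have h1 : i - 1 < arr.length := by omega
    have hg2 : PySem.List.pyGet? arr ((i : Int) - 1) = some (arr[i-1]'h1) := by
      have : ((i : Int) - 1) = ((i - 1 : Nat) : Int) := by omega
      rw [this]
      exact PySem.List.pyGet?_ofNat arr (i-1) h1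
    rw [hcons, strictlyDecreasingLoopA, hg1, hg2, hcast]
    dsimp only
    have IH := loopA_eq arr (i + 1) (by omega)
    simp only [Nat.add_sub_cancel] at IH
    rw [List.drop_eq_getElem_cons h, List.drop_eq_getElem_cons h1]
    have hsub : i - 1 + 1 = i := by omega
    rw [hsub, List.drop_eq_getElem_cons h]
    split_ifs with hc
    · rcases hc with hodd | hge
      · rw [hmod] at hodd
        simp only [List.zip_cons_cons, List.all_cons, hmod]
        simp [hodd]
      · simp only [List.zip_cons_cons, List.all_cons]
        have hlt : ¬ (arr[i] < arr[i-1]) := by omega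
        simp [hlt]
    · rw [not_or] at hc
      obtain ⟨he, h2⟩ := hc
      rw [hmod] at he
      rw [not_not] at he
      rw [IH]
      simp only [List.zip_cons_cons, List.all_cons, hmod]
      have h2' : arr[i] < arr[i-1] := by omega
      simp [he, h2']
  · have hnil : PySem.List.pyRange (i : Int) (arr.length : Int) 1 = [] := by
      simp [PySem.List.pyRange_one]
      omega
    rw [hnil, strictlyDecreasingLoopA]
    have : arr.drop i = [] := List.drop_eq_nil_of_le (by omega)
    simp [this]
termination_by arr.length - i
decreasing_by omega

-- the adjacent strict-decrease scan characterises pairwise strict decrease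
theorem zipall_iff (l : List Int) :
    ((l.zip l.tail).all (fun p => p.2 < p.1) = true) ↔ l.Pairwise (fun a b => b < a) := by
  induction l with
  | nil => simp
  | cons a t ih =>
    cases t with
    | nil => simp
    | cons b t' =>
      simp only [List.tail_cons] at ih
      rw [List.pairwise_cons]
      simp only [List.tail_cons, List.zip_cons_cons, List.all_cons, Bool.and_eq_true,
        decide_eq_true_eq]
      constructor
      · rintro ⟨hba, hrest⟩
        have hpw := ih.mp hrest
        refine ⟨fun z hz => ?_, hpw⟩
        rcases List.mem_cons.mp hz with rfl | hz'
        · exact hba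
        · exact lt_trans (List.rel_of_pairwise_cons hpw hz') hba
      · rintro ⟨hhead, hpw⟩
        exact ⟨hhead b (by simp), ih.mpr hpw⟩

-- B's sort test characterises pairwise strict decrease
theorem sorted_set_eq_iff (arr : List Int) :
    (PySem.List.sorted (PySem.Set.ofList arr) (fun x => x) true = arr) ↔
      arr.Pairwise (fun a b => b < a) := by
  constructor
  · intro h
    have hpw := PySem.List.sorted_pairwise_rev (PySem.Set.ofList arr) (fun x => x)
    have hperm := PySem.List.sorted_perm (PySem.Set.ofList arr) (fun x => x) true
    have hnd : (PySem.List.sorted (PySem.Set.ofList arr) (fun x => x) true).Nodup :=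
      hperm.nodup_iff.mpr (PySem.Set.nodup_ofList arr)
    rw [h] at hpw hnd
    exact (hpw.and hnd).imp (fun hx => lt_of_le_of_ne hx.1 (Ne.symm hx.2))
  · intro hpw
    have hnd : arr.Nodup := hpw.imp (fun h => ne_of_gt h)
    have hperm : arr.Perm (PySem.Set.ofList arr) := by
      rw [List.perm_ext_iff_of_nodup hnd (PySem.Set.nodup_ofList arr)]
      intro x
      rw [PySem.Set.mem_ofList]
    exact PySem.List.sorted_rev_eq_of_perm_of_pairwise_gt _ arr _ hperm hpw

-- ===== VERDICT (by name: the statement is the Claim_ definition above) =====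
theorem strictlyDecreasing_spec : Claim_equal_strictlyDecreasing := by
  intro arr _ hpre
  unfold Spec_strictlyDecreasing
  have hmod : ∀ a : Int, PySem.Int.mod a 2 = a % 2 :=
    fun a => PySem.Int.mod_eq_emod_of_pos (by norm_num)
  match arr with
  | [] => exact absurd rfl hpre
  | [x] =>
    have hs : PySem.List.sorted (PySem.Set.ofList [x]) (fun y => y) true = [x] :=
      (sorted_set_eq_iff [x]).mpr (by simp)
    simp only [strictlyDecreasing, strictlyDecreasing_alt, hs, List.length_cons,
      List.length_nil, List.all_cons, List.all_nil, beq_self_eq_true, Bool.true_and]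
    rw [hmod x]
    by_cases h : x % 2 = 0 <;> simp [h]
  | x :: y :: rest =>
    have hlen : ¬ ((x :: y :: rest).length ≤ 1) := by simp
    rw [strictlyDecreasing]
    simp only [hlen, if_false]
    have hl := loopA_eq (x :: y :: rest) 1 (le_refl 1)
    simp only [List.drop_one, Nat.sub_self, List.drop_zero, Nat.cast_one,
      List.tail_cons] at hl
    rw [strictlyDecreasing_alt]
    split_ifs with hodd
    · -- head odd: both sides are false
      simp only [List.all_cons]
      simp
      intro _ h2x
      exact absurd h2x (fun hd => hodd (by rw [hmod x]; exact Int.emod_eq_zero_of_dvd hd))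
    · rw [not_not] at hodd
      rw [hl]
      by_cases hp : (x :: y :: rest).Pairwise (fun a b => b < a)
      · have h1 : (((x :: y :: rest).zip (y :: rest)).all (fun p => p.2 < p.1)) = true := by
          have := (zipall_iff (x :: y :: rest)).mpr hp
          simpa using this
        have h2 : PySem.List.sorted (PySem.Set.ofList (x :: y :: rest)) (fun a => a) true
            = x :: y :: rest := (sorted_set_eq_iff (x :: y :: rest)).mpr hp
        rw [h1, h2]
        simp
        intro _ _
        exact Int.dvd_of_emod_eq_zero (by rw [hmod x] at hodd; exact hodd)
      · have h1 : (((x :: y :: rest).zip (y :: rest)).all (fun p => p.2 < p.1)) = false := by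
          rw [Bool.eq_false_iff]
          intro hT
          exact hp ((zipall_iff (x :: y :: rest)).mp (by simpa using hT))
        have h2 : ((x :: y :: rest) ==
            PySem.List.sorted (PySem.Set.ofList (x :: y :: rest)) (fun a => a) true) = false := by
          rw [Bool.eq_false_iff]
          intro hT
          exact hp ((sorted_set_eq_iff (x :: y :: rest)).mp (eq_of_beq hT).symm)
        rw [h1, h2]
        simp
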